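-- pv_equiv track=rewrite | github.com/ankurg0806/Python | FourSquareCipher.py | digraph_list
-- ===== SOURCE A (Python) =====
-- def digraph_list(str):
--     mylist = []
--     for i in range(0, len(str), 2):
--         try:
--             mylist.append(str[i] + str[i+1])
--         except IndexError:
--             mylist.append(str[i] + 'X')
--     return mylist
-- ===== SOURCE B (Python) =====
-- def digraph_list(str):
--     it = iter(str)
--     mylist = []
--     for a in it:
--         mylist.append(a + next(it, 'X'))
--     return mylist
-- ===== Notes on version B (the rewrite author's own statement) =====
-- stated objective: idiomatic
-- what changed: Replaces the index/range(step=2) loop with try/except IndexError by a single iterator-driven loop that pulls each pair partner from the same iterator via next() with the pad letter as default.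
import Mathlib
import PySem

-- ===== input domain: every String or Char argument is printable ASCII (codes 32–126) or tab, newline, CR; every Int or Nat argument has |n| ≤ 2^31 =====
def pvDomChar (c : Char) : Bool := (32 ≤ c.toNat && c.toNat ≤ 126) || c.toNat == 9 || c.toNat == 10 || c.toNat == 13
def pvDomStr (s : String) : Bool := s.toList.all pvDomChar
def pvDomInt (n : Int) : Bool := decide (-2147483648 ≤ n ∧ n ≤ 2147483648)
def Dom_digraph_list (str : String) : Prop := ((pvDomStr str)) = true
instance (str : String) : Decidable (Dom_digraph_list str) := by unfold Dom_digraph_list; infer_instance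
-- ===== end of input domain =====

-- B replaces A's index/range(step=2) loop with try/except by a single iterator-driven
-- loop pulling the pair partner via next(it, 'X'); return values are identical.

-- ===== PORT A =====
-- for i in range(0, len(str), 2): try append str[i]+str[i+1] except IndexError append str[i]+'X'
-- (str[i] is always in range since i < len; the match on pyGet? mirrors the try/except on str[i+1])
def digraph_list (str : String) : List String :=
  (PySem.List.pyRange 0 (str.toList.length : Int) 2).foldl
    (fun mylist i =>
      match PySem.List.pyGet? str.toList i, PySem.List.pyGet? str.toList (i + 1) with
      | some a, some b => mylist ++ [String.ofList [a, b]]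
      | some a, none   => mylist ++ [String.ofList [a, 'X']]
      | none,   _      => mylist)   -- unreachable: i ∈ range(0, len) is in range
    []

-- ===== PORT B =====
-- for a in it: append a + next(it, 'X')  — each iteration consumes one or two chars
def digraphGo : List Char → List String
  | [] => []
  | [a] => [String.ofList [a, 'X']]
  | a :: b :: rest => String.ofList [a, b] :: digraphGo rest

def digraph_list_alt (str : String) : List String := digraphGo str.toList

-- ===== PRECONDITION & SPEC =====
def Spec_digraph_list (str : String) (out : List String) : Prop := out = digraph_list_alt str
instance (str : String) (out : List String) : Decidable (Spec_digraph_list str out) := by unfold Spec_digraph_list; infer_instance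

-- ===== CLAIM (what is proved, stated in full; the proofs are below) =====
def Claim_equal_digraph_list : Prop := ∀ (str : String), Dom_digraph_list str → Spec_digraph_list str (digraph_list str)

-- ===== LEMMAS AND PROOFS =====

-- the fold body of port A, over Nat indices 2*k / 2*k+1
def pvBodyA (cs : List Char) (mylist : List String) (k : Nat) : List String :=
  match cs[2 * k]?, cs[2 * k + 1]? with
  | some a, some b => mylist ++ [String.ofList [a, b]]
  | some a, none   => mylist ++ [String.ofList [a, 'X']]
  | none,   _      => mylist

lemma pvCount_int (n : Nat) :
    (if (0 : Int) < n then (((n : Int) - 0 + 2 - 1) / 2).toNat else 0) = (n + 1) / 2 := by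
  split_ifs with h
  · omega
  · omega

lemma pvFoldA_eq (cs : List Char) (acc : List String) :
    (List.range ((cs.length + 1) / 2)).foldl (pvBodyA cs) acc = acc ++ digraphGo cs := by
  induction cs using digraphGo.induct generalizing acc with
  | case1 => simp [digraphGo]
  | case2 a => simp [digraphGo, pvBodyA]
  | case3 a b rest ih =>
    have hlen : (((a :: b :: rest).length + 1) / 2) = (rest.length + 1) / 2 + 1 := by
      simp only [List.length_cons]; omega
    rw [hlen, List.range_succ_eq_map, List.foldl_cons, List.foldl_map]
    have hfirst : pvBodyA (a :: b :: rest) acc 0 = acc ++ [String.ofList [a, b]] := by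
      simp [pvBodyA]
    rw [hfirst]
    have hstep : ∀ (mylist : List String) (k : Nat),
        pvBodyA (a :: b :: rest) mylist (k + 1) = pvBodyA rest mylist k := by
      intro mylist k
      simp only [pvBodyA, Nat.mul_add, Nat.mul_one]
      have h1 : (a :: b :: rest)[2 * k + 2]? = rest[2 * k]? := by
        simp
      have h2 : (a :: b :: rest)[2 * k + 2 + 1]? = rest[2 * k + 1]? := by
        simp
      rw [h1, h2]
    have hfun : (fun (mylist : List String) (k : Nat) => pvBodyA (a :: b :: rest) mylist (k + 1)) =
        pvBodyA rest := by
      funext mylist k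
      exact hstep mylist k
    rw [hfun, ih]
    simp [digraphGo]

-- ===== VERDICT (by name: the statement is the Claim_ definition above) =====
theorem digraph_list_spec : Claim_equal_digraph_list := by
  intro str _
  unfold Spec_digraph_list digraph_list digraph_list_alt
  generalize str.toList = cs
  rw [PySem.List.pyRange_of_pos 0 (cs.length : Int) (by norm_num)]
  rw [List.foldl_map]
  have hc : (if (0 : Int) < (cs.length : Int) then
      (((cs.length : Int) - 0 + 2 - 1) / 2).toNat else 0) = (cs.length + 1) / 2 :=
    pvCount_int cs.length
  rw [hc]
  have : (fun (mylist : List String) (k : Nat) =>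
      match PySem.List.pyGet? cs (0 + 2 * (k : Int)), PySem.List.pyGet? cs (0 + 2 * (k : Int) + 1) with
      | some a, some b => mylist ++ [String.ofList [a, b]]
      | some a, none   => mylist ++ [String.ofList [a, 'X']]
      | none,   _      => mylist) = pvBodyA cs := by
    funext mylist k
    have e1 : (0 : Int) + 2 * (k : Int) = ((2 * k : Nat) : Int) := by push_cast; ring
    have e2 : ((2 * k : Nat) : Int) + 1 = ((2 * k + 1 : Nat) : Int) := by push_cast; ring
    rw [e1, e2, PySem.List.pyGet?_natCast, PySem.List.pyGet?_natCast]
    rfl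
  rw [this, pvFoldA_eq]
  rfl
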